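-- pv_equiv track=rewrite | github.com/ohnorobo/3d-tangram-solver | solve.py | format_grid
-- ===== SOURCE A (Python) =====
-- PRINT_GRID = """
-- 000 100 200 300 400   001 101 201 301 401   002 102 202 302 402
--   010 110 210 310       011 111 211 311       012 112 212 312
--     120 220 320           121 221 321           122 222 322
--       130 230               131 231               132 232
--         240                   241                   242
-- """
--
-- def format_grid(moved_pieces):
--     # ~ is the 10th piece
--     # zip will discard extra length
--     grid = PRINT_GRID
--
--     for piece, identifier in zip(moved_pieces, ["0","1","2","3","4","5","6","7","8","9","~"]):
--         for spot in piece: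
--             sigyl = "<"+identifier+">" # three chars long
--             placeholder = str(spot[0]) + str(spot[1]) + str(spot[2])
--
--             grid = grid.replace(placeholder, sigyl)
--
--     return grid
-- ===== SOURCE B (Python) =====
-- PRINT_GRID = """
-- 000 100 200 300 400   001 101 201 301 401   002 102 202 302 402
--   010 110 210 310       011 111 211 311       012 112 212 312
--     120 220 320           121 221 321           122 222 322
--       130 230               131 231               132 232
--         240                   241                   242
-- """
--
-- def format_grid(moved_pieces):
--     # ~ is the 10th piece; zip discards extra pieces.
--     # Build, once, a map from coordinate token to sigyl; setdefault makes the
--     # FIRST piece claiming a token win (a replaced token cannot be replaced again).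
--     mapping = {}
--     for spots, label in zip(moved_pieces, ["0", "1", "2", "3", "4", "5", "6", "7", "8", "9", "~"]):
--         for s in spots:
--             mapping.setdefault(f"{s[0]}{s[1]}{s[2]}", "<" + label + ">")
--     # Single left-to-right pass over the template: every run of three digit
--     # characters is a coordinate token; substitute it through the map.
--     out = []
--     i = 0
--     n = len(PRINT_GRID)
--     while i < n:
--         tok = PRINT_GRID[i:i + 3]
--         if len(tok) == 3 and tok.isdigit():
--             out.append(mapping.get(tok, tok))
--             i += 3
--         else:
--             out.append(PRINT_GRID[i])
--             i += 1
--     return "".join(out)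
-- ===== Notes on version B (the rewrite author's own statement) =====
-- stated objective: alternative
-- what changed: Instead of calling str.replace on the whole template once per spot, B builds one first-wins dict from coordinate token to sigyl and then substitutes all tokens in a single left-to-right scan of the template.
import Mathlib
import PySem

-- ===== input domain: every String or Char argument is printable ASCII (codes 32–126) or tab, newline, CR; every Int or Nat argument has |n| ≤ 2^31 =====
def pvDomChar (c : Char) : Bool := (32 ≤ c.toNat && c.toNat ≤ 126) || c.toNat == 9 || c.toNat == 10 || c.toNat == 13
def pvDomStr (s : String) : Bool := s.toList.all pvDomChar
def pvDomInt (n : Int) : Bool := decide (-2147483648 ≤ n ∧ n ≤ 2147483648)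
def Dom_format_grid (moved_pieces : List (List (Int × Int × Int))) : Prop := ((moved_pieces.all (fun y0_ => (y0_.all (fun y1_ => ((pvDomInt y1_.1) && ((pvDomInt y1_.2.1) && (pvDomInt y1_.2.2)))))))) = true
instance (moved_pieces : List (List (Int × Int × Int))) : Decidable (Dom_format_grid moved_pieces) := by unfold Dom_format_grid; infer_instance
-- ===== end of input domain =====

-- B replaces A's per-spot full-template str.replace passes by one first-wins
-- dict plus a single left-to-right token scan of the template (objective: alternative).

def pvGrid : String := "\n000 100 200 300 400   001 101 201 301 401   002 102 202 302 402\n  010 110 210 310       011 111 211 311       012 112 212 312\n    120 220 320           121 221 321           122 222 322\n      130 230               131 231               132 232\n        240                   241                   242\n"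

def pvIdents : List String := ["0", "1", "2", "3", "4", "5", "6", "7", "8", "9", "~"]

-- ===== PORT A =====
def format_grid (moved_pieces : List (List (Int × Int × Int))) : String :=
  (List.zip moved_pieces pvIdents).foldl
    (fun grid pi =>
      pi.1.foldl
        (fun grid spot =>
          PySem.Str.replace grid
            (PySem.Int.toStr spot.1 ++ PySem.Int.toStr spot.2.1 ++ PySem.Int.toStr spot.2.2)
            ("<" ++ pi.2 ++ ">"))
        grid)
    pvGrid

-- ===== PORT B =====
-- the while-loop of Source B: at each position match three digit chars (a token,
-- substituted through the map) or emit one character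
def bScan (mapping : PySem.Dict String String) : List Char → List Char
  | c1 :: c2 :: c3 :: rest =>
    if PySem.Chars.isdigit c1 && PySem.Chars.isdigit c2 && PySem.Chars.isdigit c3 then
      (mapping.getD (String.ofList [c1, c2, c3]) (String.ofList [c1, c2, c3])).toList
        ++ bScan mapping rest
    else
      c1 :: bScan mapping (c2 :: c3 :: rest)
  | l => l
termination_by l => l.length

def format_grid_alt (moved_pieces : List (List (Int × Int × Int))) : String :=
  String.ofList
    (bScan
      ((List.zip moved_pieces pvIdents).foldl
        (fun m pi =>
          pi.1.foldl
            (fun m spot =>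
              m.setdefault
                (PySem.Int.toStr spot.1 ++ PySem.Int.toStr spot.2.1 ++ PySem.Int.toStr spot.2.2)
                ("<" ++ pi.2 ++ ">"))
            m)
        PySem.Dict.empty)
      pvGrid.toList)

-- ===== PRECONDITION & SPEC =====
def Spec_format_grid (moved_pieces : List (List (Int × Int × Int))) (out : String) : Prop := out = format_grid_alt moved_pieces
instance (moved_pieces : List (List (Int × Int × Int))) (out : String) : Decidable (Spec_format_grid moved_pieces out) := by unfold Spec_format_grid; infer_instance

-- ===== CLAIM (what is proved, stated in full; the proofs are below) =====
def Claim_equal_format_grid : Prop := ∀ (moved_pieces : List (List (Int × Int × Int))), Dom_format_grid moved_pieces → Spec_format_grid moved_pieces (format_grid moved_pieces)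

-- ===== LEMMAS AND PROOFS =====

-- the grid template, decomposed: a leading '\n', then (token, separator) pairs
def pvPairs : List ((Char × Char × Char) × List Char) := [
  (('0', '0', '0'), [' ']),
  (('1', '0', '0'), [' ']),
  (('2', '0', '0'), [' ']),
  (('3', '0', '0'), [' ']),
  (('4', '0', '0'), [' ', ' ', ' ']),
  (('0', '0', '1'), [' ']),
  (('1', '0', '1'), [' ']),
  (('2', '0', '1'), [' ']),
  (('3', '0', '1'), [' ']),
  (('4', '0', '1'), [' ', ' ', ' ']),
  (('0', '0', '2'), [' ']),
  (('1', '0', '2'), [' ']),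
  (('2', '0', '2'), [' ']),
  (('3', '0', '2'), [' ']),
  (('4', '0', '2'), ['\n', ' ', ' ']),
  (('0', '1', '0'), [' ']),
  (('1', '1', '0'), [' ']),
  (('2', '1', '0'), [' ']),
  (('3', '1', '0'), [' ', ' ', ' ', ' ', ' ', ' ', ' ']),
  (('0', '1', '1'), [' ']),
  (('1', '1', '1'), [' ']),
  (('2', '1', '1'), [' ']),
  (('3', '1', '1'), [' ', ' ', ' ', ' ', ' ', ' ', ' ']),
  (('0', '1', '2'), [' ']),
  (('1', '1', '2'), [' ']),
  (('2', '1', '2'), [' ']),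
  (('3', '1', '2'), ['\n', ' ', ' ', ' ', ' ']),
  (('1', '2', '0'), [' ']),
  (('2', '2', '0'), [' ']),
  (('3', '2', '0'), [' ', ' ', ' ', ' ', ' ', ' ', ' ', ' ', ' ', ' ', ' ']),
  (('1', '2', '1'), [' ']),
  (('2', '2', '1'), [' ']),
  (('3', '2', '1'), [' ', ' ', ' ', ' ', ' ', ' ', ' ', ' ', ' ', ' ', ' ']),
  (('1', '2', '2'), [' ']),
  (('2', '2', '2'), [' ']),
  (('3', '2', '2'), ['\n', ' ', ' ', ' ', ' ', ' ', ' ']),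
  (('1', '3', '0'), [' ']),
  (('2', '3', '0'), [' ', ' ', ' ', ' ', ' ', ' ', ' ', ' ', ' ', ' ', ' ', ' ', ' ', ' ', ' ']),
  (('1', '3', '1'), [' ']),
  (('2', '3', '1'), [' ', ' ', ' ', ' ', ' ', ' ', ' ', ' ', ' ', ' ', ' ', ' ', ' ', ' ', ' ']),
  (('1', '3', '2'), [' ']),
  (('2', '3', '2'), ['\n', ' ', ' ', ' ', ' ', ' ', ' ', ' ', ' ']),
  (('2', '4', '0'), [' ', ' ', ' ', ' ', ' ', ' ', ' ', ' ', ' ', ' ', ' ', ' ', ' ', ' ', ' ', ' ', ' ', ' ', ' ']),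
  (('2', '4', '1'), [' ', ' ', ' ', ' ', ' ', ' ', ' ', ' ', ' ', ' ', ' ', ' ', ' ', ' ', ' ', ' ', ' ', ' ', ' ']),
  (('2', '4', '2'), ['\n'])]

def pvTok (q : (Char × Char × Char) × List Char) : List Char := [q.1.1, q.1.2.1, q.1.2.2]
def pvKey (q : (Char × Char × Char) × List Char) : String := String.ofList (pvTok q)
def pvFlat (ps : List ((Char × Char × Char) × List Char)) : List Char :=
  ps.flatMap (fun q => pvTok q ++ q.2)
def pvRender (m : PySem.Dict String String) (ps : List ((Char × Char × Char) × List Char)) : List Char :=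
  ps.flatMap (fun q => (m.getD (pvKey q) (pvKey q)).toList ++ q.2)

def pvOkSep (s : List Char) : Bool :=
  s.all (fun c => !PySem.Chars.isdigit c && c != '-')
def pvOk (ps : List ((Char × Char × Char) × List Char)) : Bool :=
  ps.all (fun q =>
    PySem.Chars.isdigit q.1.1 && PySem.Chars.isdigit q.1.2.1 && PySem.Chars.isdigit q.1.2.2
      && !q.2.isEmpty && pvOkSep q.2)

def pvIdentChars : List Char := ['0', '1', '2', '3', '4', '5', '6', '7', '8', '9', '~']

def pvInv (m : PySem.Dict String String) : Prop :=
  ∀ k v, m.get? k = some v → ∃ x, x ∈ pvIdentChars ∧ v.toList = ['<', x, '>']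

set_option maxRecDepth 40000 in
theorem pvGrid_decomp : pvGrid.toList = '\n' :: pvFlat pvPairs := by decide

theorem pvOk_pvPairs : pvOk pvPairs = true := by decide


-- ---------- generic facts about PySem.Chars.replace ----------

theorem pvGo_acc (old new : List Char) (fuel : Nat) : ∀ (l acc : List Char),
    PySem.Chars.replace.go old new fuel l acc
      = acc.reverse ++ PySem.Chars.replace.go old new fuel l [] := by
  induction fuel with
  | zero => intro l acc; simp [PySem.Chars.replace.go]
  | succ f ih =>
    intro l acc
    cases l with
    | nil => simp [PySem.Chars.replace.go]
    | cons c t =>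
      simp only [PySem.Chars.replace.go]
      split_ifs with h
      · rw [ih _ (new.reverse ++ acc), ih _ (new.reverse ++ [])]; simp
      · rw [ih _ (c :: acc), ih _ (c :: [])]; simp

theorem pvGo_fuel (old new : List Char) (hold : old ≠ []) :
    ∀ (n : Nat) (l : List Char) (f₁ f₂ : Nat) (acc : List Char),
      l.length ≤ n → l.length ≤ f₁ → l.length ≤ f₂ →
      PySem.Chars.replace.go old new f₁ l acc = PySem.Chars.replace.go old new f₂ l acc := by
  intro n
  induction n with
  | zero =>
    intro l f₁ f₂ acc h1 _ _
    have : l = [] := List.eq_nil_of_length_eq_zero (by omega)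
    subst this
    cases f₁ <;> cases f₂ <;> simp [PySem.Chars.replace.go]
  | succ n ih =>
    intro l f₁ f₂ acc h1 h2 h3
    cases l with
    | nil => cases f₁ <;> cases f₂ <;> simp [PySem.Chars.replace.go]
    | cons c t =>
      simp only [List.length_cons] at h1 h2 h3
      obtain ⟨g₁, rfl⟩ : ∃ g, f₁ = g + 1 := ⟨f₁ - 1, by omega⟩
      obtain ⟨g₂, rfl⟩ : ∃ g, f₂ = g + 1 := ⟨f₂ - 1, by omega⟩
      simp only [PySem.Chars.replace.go]
      split_ifs with h
      · have hlen : old.length ≥ 1 := by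
          cases old with | nil => simp at hold | cons _ _ => simp
        have hd : (List.drop old.length (c :: t)).length = t.length + 1 - old.length := by
          simp [List.length_drop]
        apply ih <;> omega
      · exact ih t g₁ g₂ (c :: acc) (by omega) (by omega) (by omega)

theorem pvReplace_nil (old new : List Char) (hold : old ≠ []) :
    PySem.Chars.replace [] old new = [] := by
  simp [PySem.Chars.replace, PySem.Chars.replace.go, hold]

theorem pvReplace_skip (old new : List Char) (hold : old ≠ []) (c : Char) (t : List Char)
    (h : ¬ old <+: (c :: t)) :
    PySem.Chars.replace (c :: t) old new = c :: PySem.Chars.replace t old new := by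
  have hne : old.isEmpty = false := by simp [List.isEmpty_eq_false_iff, hold]
  simp only [PySem.Chars.replace, hne, if_false, List.length_cons, Bool.false_eq_true]
  simp only [PySem.Chars.replace.go]
  have hpf : old.isPrefixOf (c :: t) = false := by
    rw [Bool.eq_false_iff]
    intro hc
    exact h (List.isPrefixOf_iff_prefix.mp hc)
  rw [hpf]
  simp only [Bool.false_eq_true, if_false]
  rw [pvGo_acc]
  simp

theorem pvReplace_match (old new : List Char) (hold : old ≠ []) (t : List Char) :
    PySem.Chars.replace (old ++ t) old new = new ++ PySem.Chars.replace t old new := by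
  obtain ⟨o, os, rfl⟩ : ∃ o os, old = o :: os := by
    cases old with | nil => simp at hold | cons o os => exact ⟨o, os, rfl⟩
  have hne : ((o :: os) : List Char).isEmpty = false := by simp
  simp only [PySem.Chars.replace, hne, Bool.false_eq_true, if_false]
  have hlen : ((o :: os) ++ t).length = (os.length + t.length) + 1 := by simp
  rw [hlen]
  have hco : ((o :: os) ++ t) = o :: (os ++ t) := by simp
  rw [hco]
  simp only [PySem.Chars.replace.go]
  have hpf : (o :: os).isPrefixOf (o :: (os ++ t)) = true := by
    rw [List.isPrefixOf_iff_prefix]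
    exact ⟨t, by simp⟩
  rw [hpf]
  simp only [if_true]
  have hdrop : List.drop (o :: os).length (o :: (os ++ t)) = t := by
    have h2 : (o : Char) :: (os ++ t) = (o :: os) ++ t := by simp
    rw [h2, List.drop_left]
  rw [hdrop]
  rw [pvGo_fuel (o :: os) new (by simp) (t.length) t (os.length + t.length) t.length _ (le_refl _) (by omega) (le_refl _)]
  rw [pvGo_acc]
  simp

theorem pvReplace_not_infix (old new : List Char) (hold : old ≠ []) :
    ∀ s : List Char, ¬ old <:+: s → PySem.Chars.replace s old new = s := by
  intro s
  induction s with
  | nil => intro _; exact pvReplace_nil old new hold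
  | cons c t ih =>
    intro h
    rw [List.infix_cons_iff] at h
    push Not at h
    rw [pvReplace_skip old new hold c t h.1, ih h.2]

theorem pvNotPrefix_digit_head (d : Char) (pr : List Char) (hd : PySem.Chars.isdigit d = true)
    (c : Char) (hc : PySem.Chars.isdigit c = false) (t : List Char) :
    ¬ (d :: pr) <+: (c :: t) := by
  intro h
  obtain ⟨rfl, -⟩ := List.cons_prefix_cons.mp h
  rw [hd] at hc
  exact absurd hc (by simp)

theorem pvReplace_sep (d1 : Char) (pr : List Char) (hd : PySem.Chars.isdigit d1 = true)
    (new : List Char) :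
    ∀ (sep L : List Char), (∀ c ∈ sep, PySem.Chars.isdigit c = false) →
      PySem.Chars.replace (sep ++ L) (d1 :: pr) new = sep ++ PySem.Chars.replace L (d1 :: pr) new := by
  intro sep
  induction sep with
  | nil => intro L _; simp
  | cons e es ih =>
    intro L hnd
    have he : PySem.Chars.isdigit e = false := hnd e (by simp)
    rw [List.cons_append,
      pvReplace_skip _ _ (by simp) _ _ (pvNotPrefix_digit_head d1 pr hd e he _),
      ih L (fun c hc => hnd c (by simp [hc])), List.cons_append]

theorem pvSkip3 (p : List Char) (new : List Char) (hold : p ≠ []) (u1 u2 u3 : Char) (L : List Char)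
    (h1 : ¬ p <+: (u1 :: u2 :: u3 :: L)) (h2 : ¬ p <+: (u2 :: u3 :: L)) (h3 : ¬ p <+: (u3 :: L)) :
    PySem.Chars.replace (u1 :: u2 :: u3 :: L) p new
      = u1 :: u2 :: u3 :: PySem.Chars.replace L p new := by
  rw [pvReplace_skip _ _ hold _ _ h1, pvReplace_skip _ _ hold _ _ h2, pvReplace_skip _ _ hold _ _ h3]

-- ---------- unpacking the structure predicates ----------

theorem pvOk_cons (a b c : Char) (sep : List Char) (ps : List ((Char × Char × Char) × List Char))
    (h : pvOk ((((a, b, c)), sep) :: ps) = true) :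
    PySem.Chars.isdigit a = true ∧ PySem.Chars.isdigit b = true ∧ PySem.Chars.isdigit c = true
      ∧ sep ≠ [] ∧ (∀ e ∈ sep, PySem.Chars.isdigit e = false ∧ e ≠ '-') ∧ pvOk ps = true := by
  rw [pvOk, List.all_cons, Bool.and_eq_true] at h
  obtain ⟨hq, hps⟩ := h
  simp only [pvOkSep, Bool.and_eq_true, List.all_eq_true, Bool.not_eq_eq_eq_not, Bool.not_true,
    List.isEmpty_eq_false_iff, bne_iff_ne] at hq
  obtain ⟨⟨⟨⟨ha, hb⟩, hc⟩, hne⟩, hsep⟩ := hq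
  exact ⟨ha, hb, hc, hne, hsep, hps⟩

theorem pvRender_cons (M : PySem.Dict String String) (q : (Char × Char × Char) × List Char)
    (ps : List ((Char × Char × Char) × List Char)) :
    pvRender M (q :: ps) = (M.getD (pvKey q) (pvKey q)).toList ++ ((q.2) ++ pvRender M ps) := by
  simp [pvRender]

theorem pvFlat_cons (q : (Char × Char × Char) × List Char)
    (ps : List ((Char × Char × Char) × List Char)) :
    pvFlat (q :: ps) = q.1.1 :: q.1.2.1 :: q.1.2.2 :: (q.2 ++ pvFlat ps) := by
  simp [pvFlat, pvTok]

theorem pvKey_toList (q : (Char × Char × Char) × List Char) :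
    (pvKey q).toList = [q.1.1, q.1.2.1, q.1.2.2] := by
  rw [pvKey, String.toList_ofList]; rfl

-- ---------- pvInv / Dict facts ----------

theorem pvInv_empty : pvInv PySem.Dict.empty := by
  intro k v h
  simp [PySem.Dict.get?, PySem.Dict.empty] at h

theorem pvInv_setdefault (m : PySem.Dict String String) (hm : pvInv m) (k v : String)
    (hv : ∃ x, x ∈ pvIdentChars ∧ v.toList = ['<', x, '>']) :
    pvInv (m.setdefault k v) := by
  intro k' w h
  by_cases hk : k' = k
  · subst hk
    rw [PySem.Dict.get?_setdefault_self] at h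
    cases hg : m.get? k' with
    | some u =>
      rw [hg] at h
      simp only [Option.getD_some, Option.some.injEq] at h
      subst h
      exact hm _ _ hg
    | none =>
      rw [hg] at h
      simp only [Option.getD_none, Option.some.injEq] at h
      subst h
      exact hv
  · rw [PySem.Dict.get?_setdefault_of_ne _ _ hk] at h
    exact hm _ _ h

theorem pvRender_empty : ∀ ps, pvRender PySem.Dict.empty ps = pvFlat ps := by
  intro ps
  induction ps with
  | nil => rfl
  | cons q ps ih =>
    rw [pvRender_cons, pvFlat_cons, ih]
    have : PySem.Dict.empty.getD (pvKey q) (pvKey q) = pvKey q := by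
      simp [PySem.Dict.getD_eq_get?_getD, PySem.Dict.get?, PySem.Dict.empty]
    rw [this, pvKey_toList]
    rfl

-- ---------- no '-' in a rendered grid ----------

theorem pvDash_render (m : PySem.Dict String String) (hm : pvInv m) :
    ∀ ps, pvOk ps = true → '-' ∉ pvRender m ps := by
  intro ps
  induction ps with
  | nil => intro _; simp [pvRender]
  | cons q ps ih =>
    obtain ⟨⟨a, b, c⟩, sep⟩ := q
    intro hok hmem
    obtain ⟨ha, hb, hc, -, hsep, hps⟩ := pvOk_cons a b c sep ps hok
    rw [pvRender_cons] at hmem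
    rcases List.mem_append.mp hmem with h | h'
    · cases hg : m.get? (pvKey ((a, b, c), sep)) with
      | some v =>
        obtain ⟨x, hx, hvl⟩ := hm _ _ hg
        rw [PySem.Dict.getD_eq_get?_getD, hg] at h
        simp only [Option.getD_some] at h
        rw [hvl] at h
        simp only [List.mem_cons, List.not_mem_nil, or_false] at h
        rcases h with h | h | h
        · exact absurd h.symm (by decide)
        · rw [← h] at hx; revert hx; decide
        · exact absurd h.symm (by decide)
      | none =>
        rw [PySem.Dict.getD_eq_get?_getD, hg] at h
        simp only [Option.getD_none] at h
        rw [pvKey_toList] at h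
        simp only [List.mem_cons, List.not_mem_nil, or_false] at h
        rcases h with h | h | h
        · rw [← h] at ha; exact absurd ha (by decide)
        · rw [← h] at hb; exact absurd hb (by decide)
        · rw [← h] at hc; exact absurd hc (by decide)
    · rcases List.mem_append.mp h' with h | h
      · exact (hsep '-' h).2 rfl
      · exact ih hps h

theorem pvRender_setdefault_dash (tS : String) (hdash : '-' ∈ tS.toList)
    (v : String) (m : PySem.Dict String String) :
    ∀ ps, pvOk ps = true → pvRender (m.setdefault tS v) ps = pvRender m ps := by
  intro ps
  induction ps with
  | nil => intro _; rfl
  | cons q ps ih =>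
    obtain ⟨⟨a, b, c⟩, sep⟩ := q
    intro hok
    obtain ⟨ha, hb, hc, -, -, hps⟩ := pvOk_cons a b c sep ps hok
    rw [pvRender_cons, pvRender_cons, ih hps]
    have hne : pvKey ((a, b, c), sep) ≠ tS := by
      intro he
      have h2 : ([a, b, c] : List Char) = tS.toList := by
        rw [← he, pvKey_toList]
      rw [← h2] at hdash
      simp only [List.mem_cons, List.not_mem_nil, or_false] at hdash
      rcases hdash with h | h | h
      · rw [← h] at ha; exact absurd ha (by decide)
      · rw [← h] at hb; exact absurd hb (by decide)
      · rw [← h] at hc; exact absurd hc (by decide)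
    rw [PySem.Dict.getD_eq_get?_getD, PySem.Dict.getD_eq_get?_getD,
      PySem.Dict.get?_setdefault_of_ne _ _ hne]

-- ---------- the main replace-vs-map step over the token/separator structure ----------

theorem pvMain (d1 d2 d3 : Char) (r : List Char)
    (hdig : ∀ c ∈ (d1 :: d2 :: d3 :: r), PySem.Chars.isdigit c = true)
    (new : String)
    (m : PySem.Dict String String) (hm : pvInv m) :
    ∀ ps : List ((Char × Char × Char) × List Char), pvOk ps = true →
      PySem.Chars.replace (pvRender m ps) (d1 :: d2 :: d3 :: r) new.toList
        = pvRender (m.setdefault (String.ofList (d1 :: d2 :: d3 :: r)) new) ps := by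
  have hd1 : PySem.Chars.isdigit d1 = true := hdig d1 (by simp)
  have hd2 : PySem.Chars.isdigit d2 = true := hdig d2 (by simp)
  have hd3 : PySem.Chars.isdigit d3 = true := hdig d3 (by simp)
  intro ps
  induction ps with
  | nil =>
    intro _
    simp only [pvRender, List.flatMap_nil]
    exact pvReplace_nil _ _ (by simp)
  | cons q ps ih =>
    intro hok
    obtain ⟨⟨a, b, c⟩, sep⟩ := q
    obtain ⟨ha, hb, hc, hsne, hsep, hps⟩ := pvOk_cons a b c sep ps hok
    obtain ⟨e, es, rfl⟩ : ∃ e es, sep = e :: es := by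
      cases sep with | nil => simp at hsne | cons e es => exact ⟨e, es, rfl⟩
    have hse : ∀ x ∈ (e :: es), PySem.Chars.isdigit x = false := fun x hx => (hsep x hx).1
    have he : PySem.Chars.isdigit e = false := hse e (by simp)
    rw [pvRender_cons, pvRender_cons]
    cases hg : m.get? (pvKey ((a, b, c), e :: es)) with
    | some v =>
      obtain ⟨x, hx, hvl⟩ := hm _ _ hg
      have hgd : m.getD (pvKey ((a, b, c), e :: es)) (pvKey ((a, b, c), e :: es)) = v := by
        rw [PySem.Dict.getD_eq_get?_getD, hg]; rfl
      have hgd' : (m.setdefault (String.ofList (d1 :: d2 :: d3 :: r)) new).getD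
          (pvKey ((a, b, c), e :: es)) (pvKey ((a, b, c), e :: es)) = v := by
        by_cases hk : pvKey ((a, b, c), e :: es) = String.ofList (d1 :: d2 :: d3 :: r)
        · rw [PySem.Dict.setdefault_of_contains]
          · exact hgd
          · rw [PySem.Dict.contains_eq_isSome_get?, ← hk, hg]; rfl
        · rw [PySem.Dict.getD_eq_get?_getD, PySem.Dict.get?_setdefault_of_ne _ _ hk, hg]; rfl
      rw [hgd, hgd', hvl]
      simp only [List.cons_append, List.nil_append]
      rw [pvSkip3 _ _ (by simp) '<' x '>' _
        (pvNotPrefix_digit_head d1 _ hd1 '<' (by decide) _)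
        (by
          intro hpre
          obtain ⟨-, hpre⟩ := List.cons_prefix_cons.mp hpre
          obtain ⟨h2, -⟩ := List.cons_prefix_cons.mp hpre
          rw [h2] at hd2; exact absurd hd2 (by decide))
        (pvNotPrefix_digit_head d1 _ hd1 '>' (by decide) _)]
      rw [← List.cons_append, pvReplace_sep d1 _ hd1 _ _ _ hse, ih hps, List.cons_append]
    | none =>
      have hgd : m.getD (pvKey ((a, b, c), e :: es)) (pvKey ((a, b, c), e :: es))
          = pvKey ((a, b, c), e :: es) := by
        rw [PySem.Dict.getD_eq_get?_getD, hg]; rfl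
      rw [hgd]
      by_cases htok : ([a, b, c] : List Char) = d1 :: d2 :: d3 :: r
      · -- the token IS the placeholder, and it is unmapped: it gets replaced
        have hkey : pvKey ((a, b, c), e :: es) = String.ofList (d1 :: d2 :: d3 :: r) := by
          rw [pvKey, ← htok]; rfl
        have hgd' : (m.setdefault (String.ofList (d1 :: d2 :: d3 :: r)) new).getD
            (pvKey ((a, b, c), e :: es)) (pvKey ((a, b, c), e :: es)) = new := by
          rw [hkey, PySem.Dict.getD_setdefault_self, PySem.Dict.getD_eq_get?_getD,
            ← hkey, hg]; rfl
        rw [hgd', pvKey_toList]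
        have hshow : ([a, b, c] : List Char) = [((a, b, c), (e :: es)).1.1,
            ((a, b, c), (e :: es)).1.2.1, ((a, b, c), (e :: es)).1.2.2] := rfl
        rw [← hshow, htok]
        rw [pvReplace_match (d1 :: d2 :: d3 :: r) new.toList (by simp) _]
        rw [pvReplace_sep d1 _ hd1 _ _ _ hse, ih hps]
      · -- a different (or longer) placeholder: the token is skipped
        have hgd' : (m.setdefault (String.ofList (d1 :: d2 :: d3 :: r)) new).getD
            (pvKey ((a, b, c), e :: es)) (pvKey ((a, b, c), e :: es))
            = pvKey ((a, b, c), e :: es) := by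
          have hk : pvKey ((a, b, c), e :: es) ≠ String.ofList (d1 :: d2 :: d3 :: r) := by
            intro hcontra
            apply htok
            have := congrArg String.toList hcontra
            rw [pvKey_toList, String.toList_ofList] at this
            exact this
          rw [PySem.Dict.getD_eq_get?_getD, PySem.Dict.get?_setdefault_of_ne _ _ hk, hg]; rfl
        rw [hgd', pvKey_toList]
        simp only [List.cons_append, List.nil_append]
        rw [pvSkip3 _ _ (by simp) a b c _
          (by
            intro hpre
            obtain ⟨h1, hpre⟩ := List.cons_prefix_cons.mp hpre
            obtain ⟨h2, hpre⟩ := List.cons_prefix_cons.mp hpre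
            obtain ⟨h3, hpre⟩ := List.cons_prefix_cons.mp hpre
            cases r with
            | nil => exact htok (by rw [h1, h2, h3])
            | cons r1 rr =>
              obtain ⟨h4, -⟩ := List.cons_prefix_cons.mp hpre
              have hr1 : PySem.Chars.isdigit r1 = true := hdig r1 (by simp)
              rw [h4] at hr1
              rw [he] at hr1
              exact absurd hr1 (by simp))
          (by
            intro hpre
            obtain ⟨-, hpre⟩ := List.cons_prefix_cons.mp hpre
            obtain ⟨-, hpre⟩ := List.cons_prefix_cons.mp hpre
            obtain ⟨h3, -⟩ := List.cons_prefix_cons.mp hpre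
            rw [h3] at hd3
            rw [he] at hd3
            exact absurd hd3 (by simp))
          (by
            intro hpre
            obtain ⟨-, hpre⟩ := List.cons_prefix_cons.mp hpre
            obtain ⟨h2, -⟩ := List.cons_prefix_cons.mp hpre
            rw [h2] at hd2
            rw [he] at hd2
            exact absurd hd2 (by simp))]
        rw [← List.cons_append, pvReplace_sep d1 _ hd1 _ _ _ hse, ih hps, List.cons_append]

-- ---------- the bScan pass over the template ----------

theorem pvBScan_cons (m : PySem.Dict String String) (c : Char)
    (hc : PySem.Chars.isdigit c = false) (l : List Char) :
    bScan m (c :: l) = c :: bScan m l := by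
  match l with
  | [] => simp [bScan]
  | [x] => simp [bScan]
  | x :: y :: l' => simp [bScan, hc]

theorem pvBScan_sep (m : PySem.Dict String String) :
    ∀ (sep L : List Char), (∀ c ∈ sep, PySem.Chars.isdigit c = false) →
      bScan m (sep ++ L) = sep ++ bScan m L := by
  intro sep
  induction sep with
  | nil => intro L _; simp
  | cons e es ih =>
    intro L hnd
    rw [List.cons_append, pvBScan_cons m e (hnd e (by simp)) _,
      ih L (fun c hc => hnd c (by simp [hc])), List.cons_append]

theorem pvBScan_flat (m : PySem.Dict String String) :
    ∀ ps, pvOk ps = true → bScan m (pvFlat ps) = pvRender m ps := by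
  intro ps
  induction ps with
  | nil => intro _; simp [pvFlat, pvRender, bScan]
  | cons q ps ih =>
    obtain ⟨⟨a, b, c⟩, sep⟩ := q
    intro hok
    obtain ⟨ha, hb, hc, -, hsep, hps⟩ := pvOk_cons a b c sep ps hok
    rw [pvFlat_cons, pvRender_cons]
    have hstep : bScan m (((a, b, c), sep).1.1 :: ((a, b, c), sep).1.2.1 ::
        ((a, b, c), sep).1.2.2 :: (sep ++ pvFlat ps))
        = (m.getD (String.ofList [a, b, c]) (String.ofList [a, b, c])).toList
            ++ bScan m (sep ++ pvFlat ps) := by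
      rw [bScan]
      rw [if_pos (by rw [ha, hb, hc]; rfl)]
    rw [hstep, pvBScan_sep m sep _ (fun x hx => (hsep x hx).1), ih hps]
    rfl

-- ---------- characters of str(int) ----------

theorem pvDigitChar (n : Nat) (h : n < 10) : PySem.Chars.isdigit n.digitChar = true := by
  interval_cases n <;> decide

theorem pvToDigitsCore_spec : ∀ (f n : Nat) (acc : List Char),
    ∃ pre : List Char, Nat.toDigitsCore 10 f n acc = pre ++ acc
      ∧ (∀ c ∈ pre, PySem.Chars.isdigit c = true) ∧ (0 < f → pre ≠ []) := by
  intro f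
  induction f with
  | zero => intro n acc; exact ⟨[], by simp [Nat.toDigitsCore], by simp, by omega⟩
  | succ f ih =>
    intro n acc
    have hdc : PySem.Chars.isdigit (n % 10).digitChar = true :=
      pvDigitChar _ (Nat.mod_lt _ (by norm_num))
    simp only [Nat.toDigitsCore]
    split_ifs with h
    · exact ⟨[(n % 10).digitChar], by simp, by simpa using hdc, by simp⟩
    · obtain ⟨pre, heq, hds, -⟩ := ih (n / 10) ((n % 10).digitChar :: acc)
      refine ⟨pre ++ [(n % 10).digitChar], by simpa using heq, ?_, by simp⟩
      intro c hc
      rcases List.mem_append.mp hc with h' | h'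
      · exact hds c h'
      · simp only [List.mem_singleton] at h'; rw [h']; exact hdc

theorem pvToChars_ne_nil (n : Int) : PySem.Int.toChars n ≠ [] := by
  rw [PySem.Int.toChars]
  split_ifs with h
  · simp
  · rw [Nat.toDigits]
    obtain ⟨pre, heq, -, hne⟩ := pvToDigitsCore_spec (n.toNat + 1) n.toNat []
    rw [heq, List.append_nil]
    exact hne (by omega)

theorem pvToChars_chars (n : Int) :
    ∀ c ∈ PySem.Int.toChars n, PySem.Chars.isdigit c = true ∨ c = '-' := by
  intro c hc
  rw [PySem.Int.toChars] at hc
  split_ifs at hc with h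
  · rcases List.mem_cons.mp hc with h' | h'
    · exact Or.inr h'
    · rw [Nat.toDigits] at h'
      obtain ⟨pre, heq, hds, -⟩ := pvToDigitsCore_spec (n.natAbs + 1) n.natAbs []
      rw [heq, List.append_nil] at h'
      exact Or.inl (hds c h')
  · rw [Nat.toDigits] at hc
    obtain ⟨pre, heq, hds, -⟩ := pvToDigitsCore_spec (n.toNat + 1) n.toNat []
    rw [heq, List.append_nil] at hc
    exact Or.inl (hds c hc)

-- ---------- the sigyl strings ----------

theorem pvSig_shape : ∀ id_ ∈ pvIdents,
    ∃ x, x ∈ pvIdentChars ∧ ("<" ++ id_ ++ ">").toList = ['<', x, '>'] := by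
  intro id_ h
  fin_cases h
  · exact ⟨'0', by decide, by decide⟩
  · exact ⟨'1', by decide, by decide⟩
  · exact ⟨'2', by decide, by decide⟩
  · exact ⟨'3', by decide, by decide⟩
  · exact ⟨'4', by decide, by decide⟩
  · exact ⟨'5', by decide, by decide⟩
  · exact ⟨'6', by decide, by decide⟩
  · exact ⟨'7', by decide, by decide⟩
  · exact ⟨'8', by decide, by decide⟩
  · exact ⟨'9', by decide, by decide⟩
  · exact ⟨'~', by decide, by decide⟩

-- ---------- one spot: A's replace on the rendered grid = B's setdefault ----------

theorem pvStep (tS : String)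
    (hch : ∀ c ∈ tS.toList, PySem.Chars.isdigit c = true ∨ c = '-')
    (hlen : 3 ≤ tS.toList.length)
    (sig : String)
    (m : PySem.Dict String String) (hm : pvInv m) :
    PySem.Chars.replace ('\n' :: pvRender m pvPairs) tS.toList sig.toList
      = '\n' :: pvRender (m.setdefault tS sig) pvPairs := by
  have hnil : tS.toList ≠ [] := by
    intro h; rw [h] at hlen; simp at hlen
  by_cases hdash : '-' ∈ tS.toList
  · rw [pvReplace_not_infix _ _ hnil _ ?_]
    · rw [pvRender_setdefault_dash tS hdash sig m pvPairs pvOk_pvPairs]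
    · intro hinf
      have := hinf.subset hdash
      rcases List.mem_cons.mp this with h | h
      · exact absurd h (by decide)
      · exact pvDash_render m hm pvPairs pvOk_pvPairs h
  · have hall : ∀ c ∈ tS.toList, PySem.Chars.isdigit c = true :=
      fun c hc => ((hch c hc).resolve_right (fun h => hdash (h ▸ hc)))
    obtain ⟨d1, d2, d3, r, hp⟩ : ∃ d1 d2 d3 r, tS.toList = d1 :: d2 :: d3 :: r := by
      match hl : tS.toList with
      | [] | [_] | [_, _] => rw [hl] at hlen; simp at hlen
      | x :: y :: z :: w => exact ⟨x, y, z, w, rfl⟩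
    have hkey : String.ofList (d1 :: d2 :: d3 :: r) = tS := by
      rw [← hp, String.ofList_toList]
    have hdig : ∀ c ∈ (d1 :: d2 :: d3 :: r), PySem.Chars.isdigit c = true := by
      rw [← hp]; exact hall
    rw [hp]
    rw [pvReplace_skip _ _ (by simp) _ _
      (pvNotPrefix_digit_head d1 _ (hdig d1 (by simp)) '\n' (by decide) _)]
    rw [pvMain d1 d2 d3 r hdig sig m hm pvPairs pvOk_pvPairs, hkey]

-- ---------- the folds over pieces and spots ----------

theorem pvPlaceholder_facts (s : Int × Int × Int) :
    (∀ c ∈ (PySem.Int.toStr s.1 ++ PySem.Int.toStr s.2.1 ++ PySem.Int.toStr s.2.2).toList,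
        PySem.Chars.isdigit c = true ∨ c = '-')
      ∧ 3 ≤ (PySem.Int.toStr s.1 ++ PySem.Int.toStr s.2.1 ++ PySem.Int.toStr s.2.2).toList.length := by
  have htl : (PySem.Int.toStr s.1 ++ PySem.Int.toStr s.2.1 ++ PySem.Int.toStr s.2.2).toList
      = PySem.Int.toChars s.1 ++ PySem.Int.toChars s.2.1 ++ PySem.Int.toChars s.2.2 := by
    simp [PySem.Int.toStr, String.toList_ofList]
  constructor
  · rw [htl]
    intro c hc
    rcases List.mem_append.mp hc with h | h
    · rcases List.mem_append.mp h with h' | h'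
      · exact pvToChars_chars _ c h'
      · exact pvToChars_chars _ c h'
    · exact pvToChars_chars _ c h
  · rw [htl]
    simp only [List.length_append]
    have h1 := List.length_pos_iff.mpr (pvToChars_ne_nil s.1)
    have h2 := List.length_pos_iff.mpr (pvToChars_ne_nil s.2.1)
    have h3 := List.length_pos_iff.mpr (pvToChars_ne_nil s.2.2)
    omega

theorem pvFoldInner (sig : String) (hsig : ∃ x, x ∈ pvIdentChars ∧ sig.toList = ['<', x, '>']) :
    ∀ (spots : List (Int × Int × Int)) (m : PySem.Dict String String), pvInv m →
      (spots.foldl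
          (fun grid spot =>
            PySem.Str.replace grid
              (PySem.Int.toStr spot.1 ++ PySem.Int.toStr spot.2.1 ++ PySem.Int.toStr spot.2.2)
              sig)
          (String.ofList ('\n' :: pvRender m pvPairs)))
        = String.ofList ('\n' :: pvRender
            (spots.foldl
              (fun m spot =>
                m.setdefault
                  (PySem.Int.toStr spot.1 ++ PySem.Int.toStr spot.2.1 ++ PySem.Int.toStr spot.2.2)
                  sig)
              m) pvPairs)
        ∧ pvInv (spots.foldl
            (fun m spot =>
              m.setdefault
                (PySem.Int.toStr spot.1 ++ PySem.Int.toStr spot.2.1 ++ PySem.Int.toStr spot.2.2)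
                sig)
            m) := by
  intro spots
  induction spots with
  | nil => intro m hm; exact ⟨rfl, hm⟩
  | cons s rest ih =>
    intro m hm
    obtain ⟨hch, hlen⟩ := pvPlaceholder_facts s
    have hstep := pvStep _ hch hlen sig m hm
    have hrw : PySem.Str.replace (String.ofList ('\n' :: pvRender m pvPairs))
        (PySem.Int.toStr s.1 ++ PySem.Int.toStr s.2.1 ++ PySem.Int.toStr s.2.2) sig
        = String.ofList ('\n' :: pvRender
            (m.setdefault (PySem.Int.toStr s.1 ++ PySem.Int.toStr s.2.1 ++ PySem.Int.toStr s.2.2) sig)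
            pvPairs) := by
      rw [PySem.Str.replace, String.toList_ofList, hstep]
    have hm' := pvInv_setdefault m hm
      (PySem.Int.toStr s.1 ++ PySem.Int.toStr s.2.1 ++ PySem.Int.toStr s.2.2) sig hsig
    simp only [List.foldl_cons]
    rw [hrw]
    exact ih _ hm'

theorem pvFold :
    ∀ (zs : List (List (Int × Int × Int) × String)) (m : PySem.Dict String String),
      (∀ q ∈ zs, q.2 ∈ pvIdents) → pvInv m →
      (zs.foldl
          (fun grid pi =>
            pi.1.foldl
              (fun grid spot =>
                PySem.Str.replace grid
                  (PySem.Int.toStr spot.1 ++ PySem.Int.toStr spot.2.1 ++ PySem.Int.toStr spot.2.2)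
                  ("<" ++ pi.2 ++ ">"))
              grid)
          (String.ofList ('\n' :: pvRender m pvPairs)))
        = String.ofList ('\n' :: pvRender
            (zs.foldl
              (fun m pi =>
                pi.1.foldl
                  (fun m spot =>
                    m.setdefault
                      (PySem.Int.toStr spot.1 ++ PySem.Int.toStr spot.2.1 ++ PySem.Int.toStr spot.2.2)
                      ("<" ++ pi.2 ++ ">"))
                  m)
              m) pvPairs) := by
  intro zs
  induction zs with
  | nil => intro m _ _; rfl
  | cons z rest ih =>
    intro m hin hm
    have hsig := pvSig_shape z.2 (hin z (by simp))
    obtain ⟨heq, hinv⟩ := pvFoldInner ("<" ++ z.2 ++ ">") hsig z.1 m hm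
    simp only [List.foldl_cons]
    rw [heq]
    exact ih _ (fun q hq => hin q (by simp [hq])) hinv

-- ===== VERDICT (by name: the statement is the Claim_ definition above) =====
theorem format_grid_spec : Claim_equal_format_grid := by
  intro moved_pieces _
  unfold Spec_format_grid format_grid format_grid_alt
  rw [pvGrid_decomp]
  rw [pvBScan_cons _ '\n' (by decide)]
  rw [pvBScan_flat _ pvPairs pvOk_pvPairs]
  have hgrid : pvGrid = String.ofList ('\n' :: pvRender PySem.Dict.empty pvPairs) := by
    rw [pvRender_empty, ← pvGrid_decomp, String.ofList_toList]
  rw [hgrid]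
  rw [pvFold (List.zip moved_pieces pvIdents) PySem.Dict.empty
    (fun q hq => ((List.of_mem_zip (by rwa [← Prod.mk.eta (p := q)] at hq)).2)) pvInv_empty]
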